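-- pv_equiv track=rewrite | github.com/mortezamg63/JobAssistant | resumeBuilder2/app-Copy2.py | split_into_subsections
-- ===== SOURCE A (Python) =====
-- def split_into_subsections(lines):
--     subs = []
--     sub_title = None
--     buffer = []
--
--     for raw in lines:
--         if '|' in raw:
--             if sub_title is not None:
--                 subs.append((sub_title, buffer))
--             sub_title = raw.strip()
--             buffer = []
--         else:
--             buffer.append(raw)
--
--     if sub_title is not None:
--         subs.append((sub_title, buffer))
--
--     # if no '|' found at all, just return the entire block as one subsection
--     return subs or [(None, lines)]
-- ===== SOURCE B (Python) =====
-- def _sections(title, rest):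
--     # one section per delimiter line: body runs up to the next delimiter (or the end)
--     for k, l in enumerate(rest):
--         if '|' in l:
--             return [(title, rest[:k])] + _sections(l.strip(), rest[k+1:])
--     return [(title, rest)]
--
--
-- def split_into_subsections(lines):
--     # recursive splitting at delimiter lines; content before the first delimiter is dropped (as in A)
--     for k, l in enumerate(lines):
--         if '|' in l:
--             return _sections(l.strip(), lines[k+1:])
--     return [(None, lines)]
-- ===== Notes on version B (the rewrite author's own statement) =====
-- stated objective: alternative
-- what changed: Replaces A's single fold with a mutable (subs, sub_title, buffer) accumulator by a recursive decomposition: scan for the first delimiter line, then recursively emit (title, body-up-to-next-delimiter) sections via slicing.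
import Mathlib
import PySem

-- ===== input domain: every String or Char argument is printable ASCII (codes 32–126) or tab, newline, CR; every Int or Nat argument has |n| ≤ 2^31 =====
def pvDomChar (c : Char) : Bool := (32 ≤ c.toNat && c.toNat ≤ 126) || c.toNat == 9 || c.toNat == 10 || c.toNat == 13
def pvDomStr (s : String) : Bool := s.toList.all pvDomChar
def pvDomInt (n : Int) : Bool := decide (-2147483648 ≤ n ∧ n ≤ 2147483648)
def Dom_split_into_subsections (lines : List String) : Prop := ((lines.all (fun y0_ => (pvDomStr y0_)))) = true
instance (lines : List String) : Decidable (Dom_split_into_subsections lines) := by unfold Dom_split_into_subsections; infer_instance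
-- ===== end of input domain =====

-- B is a recursive decomposition (find first delimiter, then emit sections by slicing) instead of A's accumulator fold; same cost.

-- ===== PORT A =====
-- loop body: one step of A's for-loop over (subs, sub_title, buffer)
def stepA (st : List (Option String × List String) × Option String × List String)
    (raw : String) : List (Option String × List String) × Option String × List String :=
  if PySem.Str.isIn "|" raw then
    (match st.2.1 with
      | some t => st.1 ++ [(some t, st.2.2)]
      | none => st.1,
     some (PySem.Str.strip raw), [])
  else
    (st.1, st.2.1, st.2.2 ++ [raw])

-- the final 'if sub_title is not None: subs.append((sub_title, buffer))'
def finishA (st : List (Option String × List String) × Option String × List String) :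
    List (Option String × List String) :=
  match st.2.1 with
  | some t => st.1 ++ [(some t, st.2.2)]
  | none => st.1

def split_into_subsections (lines : List String) : List (Option String × List String) :=
  let subs := finishA (lines.foldl stepA ([], none, []))
  if subs = [] then [(none, lines)] else subs   -- 'return subs or [(None, lines)]'

-- ===== PORT B =====
-- the 'for k, l in enumerate(...): if "|" in l' scan: index and line of the first delimiter
def findDelim : List String → Option (Nat × String)
  | [] => none
  | l :: ls =>
      if PySem.Str.isIn "|" l then some (0, l)
      else (findDelim ls).map (fun p => (p.1 + 1, p.2))

-- _sections(title, rest); rest[:k] = rest.take k, rest[k+1:] = rest.drop (k+1) (exact for these Nat bounds)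
def sectionsB (title : String) (rest : List String) : List (Option String × List String) :=
  match hf : findDelim rest with
  | none => [(some title, rest)]
  | some (k, l) =>
      (some title, rest.take k) :: sectionsB (PySem.Str.strip l) (rest.drop (k + 1))
termination_by rest.length
decreasing_by
  cases rest with
  | nil => simp [findDelim] at hf
  | cons a as => simp [List.length_drop]

def split_into_subsections_alt (lines : List String) : List (Option String × List String) :=
  match findDelim lines with
  | none => [(none, lines)]
  | some (k, l) => sectionsB (PySem.Str.strip l) (lines.drop (k + 1))

-- ===== PRECONDITION & SPEC =====
def Spec_split_into_subsections (lines : List String) (out : List (Option String × List String)) : Prop := out = split_into_subsections_alt lines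
instance (lines : List String) (out : List (Option String × List String)) : Decidable (Spec_split_into_subsections lines out) := by unfold Spec_split_into_subsections; infer_instance

-- ===== CLAIM (what is proved, stated in full; the proofs are below) =====
def Claim_equal_split_into_subsections : Prop := ∀ (lines : List String), Dom_split_into_subsections lines → Spec_split_into_subsections lines (split_into_subsections lines)

-- ===== LEMMAS AND PROOFS =====

-- proof-only structural reformulation of A's loop once a title is active
def auxSpec (t : String) (buf : List String) : List String → List (Option String × List String)
  | [] => [(some t, buf)]
  | l :: ls =>
      if PySem.Str.isIn "|" l then (some t, buf) :: auxSpec (PySem.Str.strip l) [] ls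
      else auxSpec t (buf ++ [l]) ls

theorem sectionsB_none {rest : List String} (t : String) (h : findDelim rest = none) :
    sectionsB t rest = [(some t, rest)] := by
  rw [sectionsB]; split <;> simp_all

theorem sectionsB_some {rest : List String} {k : Nat} {l : String} (t : String)
    (h : findDelim rest = some (k, l)) :
    sectionsB t rest = (some t, rest.take k) :: sectionsB (PySem.Str.strip l) (rest.drop (k + 1)) := by
  rw [sectionsB]; split <;> simp_all

theorem sectionsB_ne_nil (t : String) (rest : List String) : sectionsB t rest ≠ [] := by
  cases h : findDelim rest with
  | none => rw [sectionsB_none t h]; simp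
  | some p => rw [sectionsB_some (k := p.1) (l := p.2) t (by simpa using h)]; simp

theorem foldl_stepA_some (ls : List String) : ∀ (t : String) (buf : List String)
    (subs : List (Option String × List String)),
    finishA (ls.foldl stepA (subs, some t, buf)) = subs ++ auxSpec t buf ls := by
  induction ls with
  | nil => intro t buf subs; simp [finishA, auxSpec]
  | cons l ls ih =>
      intro t buf subs
      by_cases hd : PySem.Chars.isIn ['|'] l.toList = true
      · simp [List.foldl_cons, stepA, hd, auxSpec, ih]
      · simp [List.foldl_cons, stepA, hd, auxSpec, ih]

theorem auxSpec_eq_sectionsB (ls : List String) : ∀ (t : String) (buf : List String),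
    auxSpec t buf ls = match sectionsB t ls with
      | (t', x) :: r => (t', buf ++ x) :: r
      | [] => [] := by
  induction ls with
  | nil =>
      intro t buf
      rw [sectionsB_none t rfl]
      simp [auxSpec]
  | cons l ls ih =>
      intro t buf
      by_cases hd : PySem.Chars.isIn ['|'] l.toList = true
      · have hfd : findDelim (l :: ls) = some (0, l) := by simp [findDelim, PySem.Str.isIn, hd]
        rw [sectionsB_some t hfd]
        have : auxSpec (PySem.Str.strip l) [] ls = sectionsB (PySem.Str.strip l) ls := by
          rw [ih]
          cases h : sectionsB (PySem.Str.strip l) ls with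
          | nil => exact absurd h (sectionsB_ne_nil _ _)
          | cons p r => cases p; simp
        simp [auxSpec, hd, this]
      · have hstep : auxSpec t buf (l :: ls) = auxSpec t (buf ++ [l]) ls := by
          simp [auxSpec, hd]
        rw [hstep, ih]
        cases h : findDelim ls with
        | none =>
            have hfd : findDelim (l :: ls) = none := by simp [findDelim, PySem.Str.isIn, hd, h]
            rw [sectionsB_none t h, sectionsB_none t hfd]
            simp
        | some p =>
            obtain ⟨k, x⟩ := p
            have hfd : findDelim (l :: ls) = some (k + 1, x) := by simp [findDelim, PySem.Str.isIn, hd, h]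
            rw [sectionsB_some t h, sectionsB_some t hfd]
            simp

theorem foldl_stepA_none (ls : List String) : ∀ (buf : List String),
    finishA (ls.foldl stepA ([], none, buf)) = match findDelim ls with
      | none => []
      | some (k, l) => sectionsB (PySem.Str.strip l) (ls.drop (k + 1)) := by
  induction ls with
  | nil => intro buf; simp [finishA, findDelim]
  | cons l ls ih =>
      intro buf
      by_cases hd : PySem.Chars.isIn ['|'] l.toList = true
      · have hfd : findDelim (l :: ls) = some (0, l) := by simp [findDelim, PySem.Str.isIn, hd]
        rw [hfd]
        have := foldl_stepA_some ls (PySem.Str.strip l) [] []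
        have haux := auxSpec_eq_sectionsB ls (PySem.Str.strip l) []
        have hsec : auxSpec (PySem.Str.strip l) [] ls = sectionsB (PySem.Str.strip l) ls := by
          rw [haux]
          cases h : sectionsB (PySem.Str.strip l) ls with
          | nil => exact absurd h (sectionsB_ne_nil _ _)
          | cons p r => cases p; simp
        simp [List.foldl_cons, stepA, hd, this, hsec]
      · cases h : findDelim ls with
        | none =>
            have hfd : findDelim (l :: ls) = none := by simp [findDelim, PySem.Str.isIn, hd, h]
            rw [hfd]
            have := ih (buf ++ [l])
            rw [h] at this
            simpa [List.foldl_cons, stepA, hd] using this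
        | some p =>
            obtain ⟨k, x⟩ := p
            have hfd : findDelim (l :: ls) = some (k + 1, x) := by simp [findDelim, PySem.Str.isIn, hd, h]
            rw [hfd]
            have := ih (buf ++ [l])
            rw [h] at this
            simpa [List.foldl_cons, stepA, hd] using this

-- ===== VERDICT (by name: the statement is the Claim_ definition above) =====
theorem split_into_subsections_spec : Claim_equal_split_into_subsections := by
  intro lines _
  unfold Spec_split_into_subsections split_into_subsections split_into_subsections_alt
  have h := foldl_stepA_none lines []
  cases hf : findDelim lines with
  | none => rw [hf] at h; simp [h]
  | some p =>
      obtain ⟨k, l⟩ := p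
      rw [hf] at h
      simp only [h]
      rw [if_neg (sectionsB_ne_nil _ _)]
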